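-- pv_equiv track=rewrite | github.com/UQ-PAC/predicate-simplifier | main.py | is_valid_sentence
-- ===== SOURCE A (Python) =====
-- def is_valid_sentence(sentence_components: list):
--     """
--     Checks if the given sentence (provided as a list of its components) constitutes a valid logical sentence.
--     Valid sentences satisfy the following criteria:
--     1. The start, all operators and opening parentheses must precede terms, unary operators or opening parentheses.
--     2. Terms and closing parentheses must precede binary operators, closing parentheses or the end.
--     3. All parentheses have matching closing parentheses.
--     :param sentence_components: the sentence to be checked for validity, given as a list of its components. See
--     @compartmentalise_sentence.
--     :return: true iff the sentence is valid.
--     """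
--     # an empty sentence is invalid
--     if not sentence_components:
--         return False
--     # keep track of open parentheses parsed vs closed parentheses parsed
--     open_minus_closed_parens = 0
--     # the start must precede terms, unary operators or opening parentheses
--     if sentence_components[0] in ['&&', '||', '=>', ')']:
--         return False
--     for i in range(0, len(sentence_components)):
--         if sentence_components[i] == '(':
--             open_minus_closed_parens += 1
--         elif sentence_components[i] == ')':
--             open_minus_closed_parens -= 1
--             if open_minus_closed_parens < 0:
--                 # found a closing parenthesis with no matching open parenthesis
--                 return False
--         # these next two conditions are simplified forms of rules 1 and 2
--         if sentence_components[i] in ['&&', '||', '=>', '~', '(']: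
--             if i + 1 == len(sentence_components) or sentence_components[i + 1] in ['&&', '||', '=>', ')']:
--                 return False
--         else:
--             if i + 1 != len(sentence_components) and sentence_components[i + 1] not in ['&&', '||', '=>', ')']:
--                 return False
--     # check that all open parentheses have matching closed parentheses
--     return open_minus_closed_parens == 0
-- ===== SOURCE B (Python) =====
-- def is_valid_sentence(sentence_components: list):
--     # single-pass finite state machine: no i+1 look-ahead, no start special-case
--     expect_operand = True
--     depth = 0
--     for token in sentence_components:
--         if expect_operand:
--             if token == '~':
--                 pass
--             elif token == '(':
--                 depth += 1
--             elif token in ('&&', '||', '=>', ')'):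
--                 return False
--             else:
--                 expect_operand = False
--         else:
--             if token in ('&&', '||', '=>'):
--                 expect_operand = True
--             elif token == ')':
--                 depth -= 1
--                 if depth < 0:
--                     return False
--             else:
--                 return False
--     return depth == 0 and not expect_operand
-- ===== Notes on version B (the rewrite author's own statement) =====
-- stated objective: simpler
-- what changed: Replaced A's i/i+1 look-ahead scan with start special-case and trailing-position tests by a single-pass finite state machine over tokens keeping an expect_operand flag and a paren depth, with validity read off the final state.
import Mathlib
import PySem

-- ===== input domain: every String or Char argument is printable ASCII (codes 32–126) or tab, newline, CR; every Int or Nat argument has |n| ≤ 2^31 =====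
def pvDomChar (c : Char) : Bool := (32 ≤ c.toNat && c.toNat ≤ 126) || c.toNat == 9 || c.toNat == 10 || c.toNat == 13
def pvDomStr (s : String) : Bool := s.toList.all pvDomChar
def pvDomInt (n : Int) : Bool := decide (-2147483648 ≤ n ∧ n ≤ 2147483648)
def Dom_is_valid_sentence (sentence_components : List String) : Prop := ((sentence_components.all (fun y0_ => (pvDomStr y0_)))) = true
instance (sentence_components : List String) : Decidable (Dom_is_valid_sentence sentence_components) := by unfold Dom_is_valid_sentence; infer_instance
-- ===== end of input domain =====

-- B replaces A's i/i+1 look-ahead scan by a single-pass state machine (expect_operand flag + depth); objective: simpler.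

-- ===== PORT A =====
-- the for-loop over i with its sentence_components[i+1] look-ahead, as structural
-- recursion over the suffix (the look-ahead becomes the head of the tail)
def isValidLoopA : List String → Int → Bool
  | [], omc => omc == 0
  | c :: rest, omc =>
    let omc' := if c == "(" then omc + 1 else if c == ")" then omc - 1 else omc
    if c == ")" && decide (omc' < 0) then false
    else if ["&&", "||", "=>", "~", "("].contains c then
      match rest with
      | [] => false
      | n :: _ => if ["&&", "||", "=>", ")"].contains n then false else isValidLoopA rest omc'
    else
      match rest with
      | [] => omc' == 0
      | n :: _ => if ["&&", "||", "=>", ")"].contains n then isValidLoopA rest omc' else false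

def is_valid_sentence (sentence_components : List String) : Bool :=
  match sentence_components with
  | [] => false
  | first :: _ =>
    if ["&&", "||", "=>", ")"].contains first then false
    else isValidLoopA sentence_components 0

-- ===== PORT B =====
def altLoop : List String → Bool → Int → Bool
  | [], expectOperand, depth => !expectOperand && depth == 0
  | t :: rest, expectOperand, depth =>
    if expectOperand then
      if t == "~" then altLoop rest true depth
      else if t == "(" then altLoop rest true (depth + 1)
      else if t == "&&" || t == "||" || t == "=>" || t == ")" then false
      else altLoop rest false depth
    else
      if t == "&&" || t == "||" || t == "=>" then altLoop rest true depth
      else if t == ")" then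
        if decide (depth - 1 < 0) then false else altLoop rest false (depth - 1)
      else false

def is_valid_sentence_alt (sentence_components : List String) : Bool :=
  altLoop sentence_components true 0

-- ===== PRECONDITION & SPEC =====
def Spec_is_valid_sentence (sentence_components : List String) (out : Bool) : Prop := out = is_valid_sentence_alt sentence_components
instance (sentence_components : List String) (out : Bool) : Decidable (Spec_is_valid_sentence sentence_components out) := by unfold Spec_is_valid_sentence; infer_instance

-- ===== CLAIM (what is proved, stated in full; the proofs are below) =====
def Claim_equal_is_valid_sentence : Prop := ∀ (sentence_components : List String), Dom_is_valid_sentence sentence_components → Spec_is_valid_sentence sentence_components (is_valid_sentence sentence_components)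

-- ===== LEMMAS AND PROOFS =====

set_option maxRecDepth 8000

theorem contains4_true {n : String} (h : n = "&&" ∨ n = "||" ∨ n = "=>" ∨ n = ")") :
    (["&&", "||", "=>", ")"] : List String).contains n = true := by
  rcases h with h|h|h|h <;> subst h <;> decide

theorem contains4_false {n : String} (h : ¬(n = "&&" ∨ n = "||" ∨ n = "=>" ∨ n = ")")) :
    (["&&", "||", "=>", ")"] : List String).contains n = false := by
  push_neg at h
  simp [h.1, h.2.1, h.2.2.1, h.2.2.2]

-- B's state machine rejects any list headed by a binop or ')' when an operand is expected
theorem altLoop_expect_head {n : String} (r2 : List String) (d : Int)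
    (h : n = "&&" ∨ n = "||" ∨ n = "=>" ∨ n = ")") :
    altLoop (n :: r2) true d = false := by
  rcases h with h|h|h|h <;> subst h <;> simp [altLoop]

-- B's state machine rejects any list headed by a term when an operator is expected
theorem altLoop_term_head {n : String} (r2 : List String) (d : Int)
    (h : ¬(n = "&&" ∨ n = "||" ∨ n = "=>" ∨ n = ")")) :
    altLoop (n :: r2) false d = false := by
  push_neg at h
  simp [altLoop, h.1, h.2.1, h.2.2.1, h.2.2.2]

-- A's loop entered with a head of known class equals B's state machine:
-- operand-class head (term / '~' / '(') ↔ expectOperand = true, binop / ')' head ↔ expectOperand = false.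
theorem loopA_eq_altLoop : ∀ (l : List String) (omc : Int),
    (∀ c rest, l = c :: rest → ¬(c = "&&" ∨ c = "||" ∨ c = "=>" ∨ c = ")") →
      isValidLoopA l omc = altLoop l true omc) ∧
    (∀ c rest, l = c :: rest → (c = "&&" ∨ c = "||" ∨ c = "=>" ∨ c = ")") →
      isValidLoopA l omc = altLoop l false omc) := by
  intro l
  induction l with
  | nil =>
    intro omc
    refine ⟨?_, ?_⟩ <;> · intro c rest h; cases h
  | cons c rest ih =>
    intro omc
    have tailT : ∀ (omc' : Int) (n : String) (r2 : List String), rest = n :: r2 →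
        ¬(n = "&&" ∨ n = "||" ∨ n = "=>" ∨ n = ")") →
        isValidLoopA rest omc' = altLoop rest true omc' := by
      intro omc' n r2 he hn; subst he; exact (ih omc').1 n r2 rfl hn
    have tailF : ∀ (omc' : Int) (n : String) (r2 : List String), rest = n :: r2 →
        (n = "&&" ∨ n = "||" ∨ n = "=>" ∨ n = ")") →
        isValidLoopA rest omc' = altLoop rest false omc' := by
      intro omc' n r2 he hn; subst he; exact (ih omc').2 n r2 rfl hn
    clear ih
    constructor
    · intro c' rest' he hop
      injection he with h1 h2; subst h1; subst h2
      by_cases hT : c = "~"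
      · subst hT
        simp only [isValidLoopA, altLoop]
        simp only [show (("~":String) == "~") = true by decide,
          show (("~":String) == "(") = false by decide,
          show (("~":String) == ")") = false by decide,
          show (["&&", "||", "=>", "~", "("] : List String).contains "~" = true by decide,
          Bool.false_and, Bool.false_eq_true, if_false, if_true]
        cases rest with
        | nil => simp [altLoop]
        | cons n r2 =>
          by_cases hn : n = "&&" ∨ n = "||" ∨ n = "=>" ∨ n = ")"
          · simp only [contains4_true hn, if_true, altLoop_expect_head r2 omc hn]
          · simp only [contains4_false hn, Bool.false_eq_true, if_false]
            exact tailT omc n r2 rfl hn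
      · by_cases hO : c = "("
        · subst hO
          simp only [isValidLoopA, altLoop]
          simp only [show (("(":String) == "(") = true by decide,
            show (("(":String) == ")") = false by decide,
            show (("(":String) == "~") = false by decide,
            show (["&&", "||", "=>", "~", "("] : List String).contains "(" = true by decide,
            Bool.false_and, Bool.false_eq_true, if_false, if_true]
          cases rest with
          | nil => simp [altLoop]
          | cons n r2 =>
            by_cases hn : n = "&&" ∨ n = "||" ∨ n = "=>" ∨ n = ")"
            · simp only [contains4_true hn, if_true, altLoop_expect_head r2 (omc + 1) hn]
            · simp only [contains4_false hn, Bool.false_eq_true, if_false]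
              exact tailT (omc + 1) n r2 rfl hn
        · -- c is a term
          push_neg at hop
          obtain ⟨ha, hb, hc', hd⟩ := hop
          have e1 : (c == "(") = false := by simp [hO]
          have e2 : (c == ")") = false := by simp [hd]
          have e3 : (c == "~") = false := by simp [hT]
          have e5 : (["&&", "||", "=>", "~", "("] : List String).contains c = false := by
            simp [ha, hb, hc', hT, hO]
          have ea : (c == "&&") = false := by simp [ha]
          have eb : (c == "||") = false := by simp [hb]
          have ec : (c == "=>") = false := by simp [hc']
          simp only [isValidLoopA, altLoop, e1, e2, e3, e5, ea, eb, ec,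
            Bool.false_and, Bool.or_false,
            Bool.false_eq_true, if_false]
          cases rest with
          | nil => simp [altLoop]
          | cons n r2 =>
            by_cases hn : n = "&&" ∨ n = "||" ∨ n = "=>" ∨ n = ")"
            · simp only [contains4_true hn, if_true]
              exact tailF omc n r2 rfl hn
            · simp only [contains4_false hn, Bool.false_eq_true, if_false,
                altLoop_term_head r2 omc hn]
              simp
    · intro c' rest' he hcl
      injection he with h1 h2; subst h1; subst h2
      by_cases hp : c = ")"
      · subst hp
        simp only [isValidLoopA, altLoop]
        simp only [show ((")":String) == "(") = false by decide,
          show ((")":String) == ")") = true by decide,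
          show ((")":String) == "&&" || (")":String) == "||" || (")":String) == "=>") = false by decide,
          show (["&&", "||", "=>", "~", "("] : List String).contains ")" = false by decide,
          Bool.true_and, Bool.false_eq_true, if_false, if_true]
        by_cases h5 : omc - 1 < 0
        · simp [h5]
        · simp only [decide_eq_false h5, Bool.false_eq_true, if_false]
          cases rest with
          | nil => simp [altLoop]
          | cons n r2 =>
            by_cases hn : n = "&&" ∨ n = "||" ∨ n = "=>" ∨ n = ")"
            · simp only [contains4_true hn, if_true]
              exact tailF (omc - 1) n r2 rfl hn
            · simp only [contains4_false hn, Bool.false_eq_true, if_false,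
                altLoop_term_head r2 (omc - 1) hn]
      · have hb3 : c = "&&" ∨ c = "||" ∨ c = "=>" := by tauto
        rcases hb3 with h|h|h <;> subst h <;>
        · simp only [isValidLoopA, altLoop]
          simp only [show (("&&":String) == "(") = false by decide,
            show (("&&":String) == ")") = false by decide,
            show (("&&":String) == "&&" || ("&&":String) == "||" || ("&&":String) == "=>") = true by decide,
            show (["&&", "||", "=>", "~", "("] : List String).contains "&&" = true by decide,
            show (("||":String) == "(") = false by decide,
            show (("||":String) == ")") = false by decide,
            show (("||":String) == "&&" || ("||":String) == "||" || ("||":String) == "=>") = true by decide,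
            show (["&&", "||", "=>", "~", "("] : List String).contains "||" = true by decide,
            show (("=>":String) == "(") = false by decide,
            show (("=>":String) == ")") = false by decide,
            show (("=>":String) == "&&" || ("=>":String) == "||" || ("=>":String) == "=>") = true by decide,
            show (["&&", "||", "=>", "~", "("] : List String).contains "=>" = true by decide,
            Bool.false_and, Bool.false_eq_true, if_false, if_true]
          cases rest with
          | nil => simp [altLoop]
          | cons n r2 =>
            by_cases hn : n = "&&" ∨ n = "||" ∨ n = "=>" ∨ n = ")"
            · simp only [contains4_true hn, if_true, altLoop_expect_head r2 omc hn]
            · simp only [contains4_false hn, Bool.false_eq_true, if_false]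
              exact tailT omc n r2 rfl hn

-- ===== VERDICT (by name: the statement is the Claim_ definition above) =====
theorem is_valid_sentence_spec : Claim_equal_is_valid_sentence := by
  intro sc _
  unfold Spec_is_valid_sentence is_valid_sentence is_valid_sentence_alt
  cases sc with
  | nil => simp [altLoop]
  | cons c rest =>
    by_cases h : c = "&&" ∨ c = "||" ∨ c = "=>" ∨ c = ")"
    · simp only [contains4_true h, if_true, altLoop_expect_head rest 0 h]
    · simp only [contains4_false h, Bool.false_eq_true, if_false]
      exact (loopA_eq_altLoop (c :: rest) 0).1 c rest rfl h
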